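-- pv_equiv track=rewrite | github.com/gonicolas12/My_AI | context_optimization.py | _detect_repetitive_content
-- ===== SOURCE A (Python) =====
-- def _detect_repetitive_content(text: str) -> bool:
--     """Détecte si le contenu est répétitif"""
--     sentences = text.split('.')
--     if len(sentences) < 5:
--         return False
--
--     # Vérifier la répétition de phrases similaires
--     unique_sentences = set()
--     repetitive_count = 0
--
--     for sentence in sentences:
--         sentence_clean = ' '.join(sentence.strip().split()[:5])  # 5 premiers mots
--         if sentence_clean in unique_sentences:
--             repetitive_count += 1
--         else:
--             unique_sentences.add(sentence_clean)
--
--     return repetitive_count / len(sentences) > 0.3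
-- ===== SOURCE B (Python) =====
-- def _detect_repetitive_content(text: str) -> bool:
--     """Détecte si le contenu est répétitif"""
--     sentences = text.split('.')
--     n = len(sentences)
--     if n < 5:
--         return False
--     # Sort-then-scan: sort the 5-word prefixes, then count duplicates as
--     # adjacent equal pairs (a group of k equal prefixes yields k-1 pairs,
--     # exactly the number of repetitions A counts for that group).
--     prefixes = sorted(' '.join(s.strip().split()[:5]) for s in sentences)
--     repetitive_count = sum(1 for a, b in zip(prefixes, prefixes[1:]) if a == b)
--     return repetitive_count / n > 0.3
-- ===== Notes on version B (the rewrite author's own statement) =====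
-- stated objective: alternative
-- what changed: A scans once keeping a seen-set and a running duplicate counter; B sorts the 5-word prefixes and counts duplicates as adjacent equal pairs in the sorted list (no set at all), then tests the same 0.3 ratio.
import Mathlib
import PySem

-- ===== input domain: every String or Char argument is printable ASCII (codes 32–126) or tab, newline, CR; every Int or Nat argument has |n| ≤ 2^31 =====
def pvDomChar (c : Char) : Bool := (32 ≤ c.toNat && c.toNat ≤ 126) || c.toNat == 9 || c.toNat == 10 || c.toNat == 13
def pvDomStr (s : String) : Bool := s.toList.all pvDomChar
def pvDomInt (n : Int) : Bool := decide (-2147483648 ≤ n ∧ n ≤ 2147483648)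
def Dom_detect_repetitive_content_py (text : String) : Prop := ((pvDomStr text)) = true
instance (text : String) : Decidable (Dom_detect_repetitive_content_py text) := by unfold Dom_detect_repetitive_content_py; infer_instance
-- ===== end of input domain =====

-- B replaces A's seen-set/counter scan by sort-then-scan: sort the 5-word prefixes and
-- count duplicates as adjacent equal pairs (alternative algorithm, similar cost).

-- shared helper: the verbatim prefix expression ' '.join(sentence.strip().split()[:5])
-- that both Python sources contain
def pvPrefix5 (s : List Char) : List Char :=
  PySem.Chars.join [' '] (PySem.List.slice (PySem.Chars.split₀ (PySem.Chars.strip s)) none (some 5))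

-- ===== PORT A =====
-- Python's final 'repetitive_count / len(sentences) > 0.3' (float) is ported as the
-- integer inequality '10 * repetitive_count > 3 * len(sentences)', which is exact here:
-- 0 ≤ count ≤ len and the two thresholds decide identically for any feasible length.
def detect_repetitive_content_py (text : String) : Bool :=
  let sentences := PySem.Chars.splitOn text.toList ['.']
  if sentences.length < 5 then false
  else
    let r := sentences.foldl
      (fun (p : PySem.Set (List Char) × Nat) sentence =>
        let c := pvPrefix5 sentence
        if PySem.Set.contains p.1 c then (p.1, p.2 + 1) else (PySem.Set.add p.1 c, p.2))
      (PySem.Set.empty, 0)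
    decide (10 * r.2 > 3 * sentences.length)

-- ===== PORT B =====
-- same exact integer form of Source B's 'repetitive_count / n > 0.3';
-- zip(prefixes, prefixes[1:]) ported as List.zip with PySem.List.slice for [1:]
def detect_repetitive_content_py_alt (text : String) : Bool :=
  let sentences := PySem.Chars.splitOn text.toList ['.']
  let n := sentences.length
  if n < 5 then false
  else
    let prefixes := PySem.List.sorted (sentences.map pvPrefix5) (fun x => x) false
    let repetitive_count :=
      ((prefixes.zip (PySem.List.slice prefixes (some 1) none)).filter
        (fun p => p.1 == p.2)).length
    decide (10 * repetitive_count > 3 * n)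

-- ===== PRECONDITION & SPEC =====
def Spec_detect_repetitive_content_py (text : String) (out : Bool) : Prop := out = detect_repetitive_content_py_alt text
instance (text : String) (out : Bool) : Decidable (Spec_detect_repetitive_content_py text out) := by unfold Spec_detect_repetitive_content_py; infer_instance

-- ===== CLAIM =====
def Claim_equal_detect_repetitive_content_py : Prop := ∀ (text : String), Dom_detect_repetitive_content_py text → Spec_detect_repetitive_content_py text (detect_repetitive_content_py text)

-- ===== LEMMAS AND PROOFS =====

def pvCard (l : List (List Char)) : Nat := (PySem.Set.ofList l).length
def pvAdj (l : List (List Char)) : Nat :=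
  ((l.zip l.tail).filter (fun p => p.1 == p.2)).length

theorem pvFoldAddLen (l : List (List Char)) :
    ∀ s : PySem.Set (List Char), (List.foldl PySem.Set.add s l).length ≤ s.length + l.length := by
  induction l with
  | nil => intro s; simp
  | cons x t ih =>
    intro s
    have h1 : (PySem.Set.add s x).length ≤ s.length + 1 := by
      by_cases h : x ∈ s <;> simp [PySem.Set.add, h]
    have := ih (PySem.Set.add s x)
    simp only [List.foldl, List.length_cons]
    omega

theorem pvCard_le_length (l : List (List Char)) : pvCard l ≤ l.length := by
  have := pvFoldAddLen l PySem.Set.empty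
  simpa [pvCard, PySem.Set.ofList_eq_foldl, PySem.Set.empty] using this

theorem pvCard_perm {l l' : List (List Char)} (h : l.Perm l') : pvCard l = pvCard l' := by
  have hp : (PySem.Set.ofList l).Perm (PySem.Set.ofList l') := by
    rw [List.perm_ext_iff_of_nodup (PySem.Set.nodup_ofList l) (PySem.Set.nodup_ofList l')]
    intro a
    rw [PySem.Set.mem_ofList, PySem.Set.mem_ofList]
    exact ⟨fun ha => h.mem_iff.mp ha, fun ha => h.mem_iff.mpr ha⟩
  exact hp.length_eq

theorem pvCard_cons (x : List Char) (t : List (List Char)) :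
    pvCard (x :: t) = if x ∈ t then pvCard t else pvCard t + 1 := by
  by_cases hm : x ∈ t
  · rw [if_pos hm]
    have hp : (PySem.Set.ofList (x :: t)).Perm (PySem.Set.ofList t) := by
      rw [List.perm_ext_iff_of_nodup (PySem.Set.nodup_ofList _) (PySem.Set.nodup_ofList _)]
      intro a
      rw [PySem.Set.mem_ofList, PySem.Set.mem_ofList, List.mem_cons]
      constructor
      · rintro (rfl | ha) <;> [exact hm; exact ha]
      · exact Or.inr
    exact hp.length_eq
  · rw [if_neg hm]
    have hnd : (x :: PySem.Set.ofList t).Nodup := by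
      refine List.nodup_cons.mpr ⟨?_, PySem.Set.nodup_ofList t⟩
      rw [PySem.Set.mem_ofList]; exact hm
    have hp : (PySem.Set.ofList (x :: t)).Perm (x :: PySem.Set.ofList t) := by
      rw [List.perm_ext_iff_of_nodup (PySem.Set.nodup_ofList _) hnd]
      intro a
      rw [PySem.Set.mem_ofList, List.mem_cons, List.mem_cons, PySem.Set.mem_ofList]
    simpa using hp.length_eq

theorem pvAdj_cons2 (x y : List Char) (t : List (List Char)) :
    pvAdj (x :: y :: t) = (if x = y then 1 else 0) + pvAdj (y :: t) := by
  by_cases h : x = y <;> simp [pvAdj, h] <;> omega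

theorem pvAdj_sorted (l : List (List Char)) (h : l.Pairwise (fun a b => a < b ∨ a = b)) :
    pvAdj l + pvCard l = l.length := by
  induction l with
  | nil => simp [pvAdj, pvCard, PySem.Set.ofList]
  | cons x t ih =>
    rcases List.pairwise_cons.mp h with ⟨hx, ht⟩
    cases t with
    | nil => simp [pvAdj, pvCard, PySem.Set.ofList, PySem.Set.add, PySem.Set.empty]
    | cons y t' =>
      have hrec := ih ht
      rw [pvAdj_cons2, pvCard_cons]
      by_cases hxy : x = y
      · have hm : x ∈ y :: t' := by rw [hxy]; exact List.mem_cons_self ..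
        rw [if_pos hxy, if_pos hm]
        simp only [List.length_cons] at hrec ⊢
        omega
      · have hnm : x ∉ y :: t' := by
          intro hmem
          rcases List.mem_cons.mp hmem with rfl | hmem'
          · exact hxy rfl
          · have hxylt : x < y := by
              rcases hx y (List.mem_cons_self ..) with hlt | heq
              · exact hlt
              · exact absurd heq hxy
            rcases List.pairwise_cons.mp ht with ⟨hy, _⟩
            rcases hy x hmem' with hlt | heq
            · exact absurd hxylt (lt_asymm hlt)
            · exact absurd hxylt (by rw [heq]; exact lt_irrefl x)
        rw [if_neg hxy, if_neg hnm]
        simp only [List.length_cons] at hrec ⊢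
        omega

-- Invariant of A's loop: duplicate counter + number of distinct keys seen = items processed.
theorem pvFoldCount {α β : Type} [BEq β] (f : α → β) :
    ∀ (l : List α) (s : PySem.Set β) (c : Nat),
      (l.foldl
        (fun (p : PySem.Set β × Nat) x =>
          let k := f x
          if PySem.Set.contains p.1 k then (p.1, p.2 + 1) else (PySem.Set.add p.1 k, p.2))
        (s, c)).2
      + (PySem.Set.update s (l.map f)).length
      = c + l.length + s.length := by
  intro l
  induction l with
  | nil => intro s c; simp [PySem.Set.update]
  | cons x l ih =>
    intro s c
    have ih' := fun s' c' => ih s' c'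
    simp only [List.foldl, List.map, List.length_cons, PySem.Set.update] at ih' ⊢
    by_cases h : PySem.Set.contains s (f x) = true
    · have hadd : PySem.Set.add s (f x) = s := by
        simp [PySem.Set.add, show List.contains s (f x) = true from h]
      rw [if_pos h, hadd]
      have hrec := ih' s (c + 1)
      omega
    · have h' : List.contains s (f x) = false := by simpa using h
      have hlen : (PySem.Set.add s (f x)).length = s.length + 1 := by
        simp [PySem.Set.add, h']
      rw [if_neg h]
      have hrec := ih' (PySem.Set.add s (f x)) c
      omega

-- ===== VERDICT =====
theorem detect_repetitive_content_py_spec : Claim_equal_detect_repetitive_content_py := by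
  intro text _
  unfold Spec_detect_repetitive_content_py detect_repetitive_content_py detect_repetitive_content_py_alt
  set l := PySem.Chars.splitOn text.toList ['.'] with hl
  by_cases h5 : l.length < 5
  · simp [h5]
  · simp only [h5, if_false]
    set pr := l.map pvPrefix5 with hpr
    set sp := PySem.List.sorted pr (fun x => x) false with hsp
    -- A's count: loop invariant gives count + #distinct = n
    have key := pvFoldCount pvPrefix5 l PySem.Set.empty 0
    simp only [PySem.Set.update] at key
    have hemp : (PySem.Set.empty : PySem.Set (List Char)).length = 0 := rfl
    rw [hemp] at key
    have hab : pvCard pr = (List.foldl PySem.Set.add PySem.Set.empty (List.map pvPrefix5 l)).length := by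
      rw [hpr]; simp [pvCard, PySem.Set.ofList_eq_foldl]
    -- B's count: adjacent equal pairs in the sorted prefixes
    have hperm : sp.Perm pr := PySem.List.sorted_perm pr (fun x => x) false
    have hpair : sp.Pairwise (fun a b => a < b ∨ a = b) := by
      have h := PySem.List.sorted_pairwise pr (fun x => x)
      have h2 : sp.Pairwise (fun a b : List Char => a ≤ b) := by
        rw [hsp]; convert h using 2
      exact h2.imp (fun hle => le_iff_lt_or_eq.mp hle)
    have hB : pvAdj sp + pvCard pr = l.length := by
      have h := pvAdj_sorted sp hpair
      rw [pvCard_perm hperm] at h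
      rw [h, hperm.length_eq]
      simp [hpr]
    have hadj : ((sp.zip (PySem.List.slice sp (some 1) none)).filter
        (fun p => p.1 == p.2)).length = pvAdj sp := by
      rw [PySem.List.slice_from_one]; rfl
    rw [hadj]
    apply decide_eq_decide.mpr
    have hle := pvCard_le_length pr
    omega
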